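-- pv_equiv track=rewrite | github.com/ZJU-DAILY/CollaborEM | AttrGNN/load_data.py | transform_triple2seq
-- ===== SOURCE A (Python) =====
-- def transform_triple2seq(att_triples, language, concate_values=False):
--     # ent_id_seq = [ent1_id, ent2_id, ent3_id...]
--     # prop_num = [ent1_num_prop, ent2_num_prop...]
--     # att_id_seq = [[ent1_prop1_id, ent1_prop2_id, ...]...]
--     # value_seq = [[ent1_value1, ent1_value2, ...]...]
--     # Fixme: select the first 20 attributes
--     # Fixme: Original average property number 26 --> only one property average property number 15.9 --> top 20 property 10.09
--
--     top_k_att = 3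
--     ent_id_seq = []
--     prop2value_seq = []
--     for ent_id, value, att_id in att_triples:
--         if len(ent_id_seq) == 0:
--             ent_id_seq.append(ent_id)
--             prop2value_seq.append(dict())
--         if ent_id != ent_id_seq[-1]:
--             ent_id_seq.append(ent_id)
--             prop2value_seq.append(dict())
--         if not concate_values:
--             prop2value_seq[-1][att_id] = value
--         else:
--             if att_id in prop2value_seq[-1]:
--                 prop2value_seq[-1][att_id] += '. ' + value
--             else:
--                 prop2value_seq[-1][att_id] = value
--     att_id_seq = []
--     value_seq = []
--     for prop2value in prop2value_seq:
--         att_ids, values = zip(*list(prop2value.items()))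
--         assert len(values) == len(att_ids)
--         att_id_seq.append(att_ids[:top_k_att])
--         value_seq.append(values[:top_k_att])
--     return ent_id_seq, att_id_seq, value_seq
-- ===== SOURCE B (Python) =====
-- def transform_triple2seq(att_triples, language, concate_values=False):
--     top_k_att = 3
--
--     def run_length(ts):
--         # length of the leading block sharing ts[0]'s entity id
--         i = 0
--         while i < len(ts) and ts[i][0] == ts[0][0]:
--             i += 1
--         return i
--
--     def aggregate(run, k):
--         # all values of attribute k within the run, in order
--         vals = [v for _, v, a in run if a == k]
--         return '. '.join(vals) if concate_values else vals[-1]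
--
--     ent_id_seq, att_id_seq, value_seq = [], [], []
--     rest = att_triples
--     while rest:
--         n = run_length(rest)
--         run, rest = rest[:n], rest[n:]
--         seen = []
--         for _, _, a in run:
--             if a not in seen:
--                 seen.append(a)
--         top = seen[:top_k_att]
--         ent_id_seq.append(run[0][0])
--         att_id_seq.append(tuple(top))
--         value_seq.append(tuple(aggregate(run, k) for k in top))
--     return ent_id_seq, att_id_seq, value_seq
-- ===== Notes on version B (the rewrite author's own statement) =====
-- stated objective: alternative
-- what changed: B drops A's incrementally updated per-entity dict (and A's second unzip pass) entirely: it splits the list into counted entity runs and, per run, computes the first-occurrence top-3 attribute ids and then each attribute's value by a per-key aggregation over the run ('. '.join of its values, or the last one), instead of maintaining key->value state triple by triple.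
import Mathlib
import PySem

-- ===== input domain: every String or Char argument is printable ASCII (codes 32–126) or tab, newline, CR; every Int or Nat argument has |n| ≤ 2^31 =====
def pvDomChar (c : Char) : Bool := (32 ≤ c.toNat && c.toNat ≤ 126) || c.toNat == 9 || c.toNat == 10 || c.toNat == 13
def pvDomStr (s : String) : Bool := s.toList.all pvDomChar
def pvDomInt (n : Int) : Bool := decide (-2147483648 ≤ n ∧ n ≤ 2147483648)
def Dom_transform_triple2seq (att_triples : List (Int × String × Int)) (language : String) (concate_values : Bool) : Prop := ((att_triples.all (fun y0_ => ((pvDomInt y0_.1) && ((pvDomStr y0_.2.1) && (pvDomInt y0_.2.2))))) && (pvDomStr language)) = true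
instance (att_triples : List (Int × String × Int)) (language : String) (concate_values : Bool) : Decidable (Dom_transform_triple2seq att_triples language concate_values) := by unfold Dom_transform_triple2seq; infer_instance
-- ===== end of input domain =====

-- B replaces A's incrementally-updated per-entity dict and second unzip pass with counted entity runs,
-- a first-occurrence dedup of attribute ids, and a per-attribute aggregation over the run; objective: alternative.


-- ===== PORT A =====
-- one iteration of A's first loop (append new entity when the last changes, update the last dict)
def pvStepA (c : Bool) (st : List Int × List (PySem.Dict Int String)) (t : Int × String × Int) : List Int × List (PySem.Dict Int String) :=
  let st1 := if st.1.length = 0 then (st.1 ++ [t.1], st.2 ++ [PySem.Dict.empty]) else st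
  let st2 := if some t.1 ≠ st1.1.getLast? then (st1.1 ++ [t.1], st1.2 ++ [PySem.Dict.empty]) else st1
  match st2.2.getLast? with
  | some d => (st2.1, st2.2.dropLast ++
      [if !c then d.insert t.2.2 t.2.1
       else if d.contains t.2.2 then d.modify t.2.2 "" (fun s => s ++ ". " ++ t.2.1)
       else d.insert t.2.2 t.2.1])
  | none => st2   -- unreachable: prop2value_seq is nonempty at this point in A

-- A's second loop body: zip(*prop2value.items()) then [:3]; the dict is never empty in A
def pvPassA (d : PySem.Dict Int String) : List Int × List String :=
  ((d.items.map (·.1)).take 3, (d.items.map (·.2)).take 3)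

def transform_triple2seq (att_triples : List (Int × String × Int)) (language : String) (concate_values : Bool) : List Int × List (List Int) × List (List String) :=
  let p := att_triples.foldl (pvStepA concate_values) ([], [])
  let q := p.2.foldl (fun (acc : List (List Int) × List (List String)) d =>
      (acc.1 ++ [(pvPassA d).1], acc.2 ++ [(pvPassA d).2])) ([], [])
  (p.1, q.1, q.2)

-- ===== PORT B =====
-- run_length's index loop: how many leading triples have entity id e
def pvRunLenAux (e : Int) : List (Int × String × Int) → Nat
  | [] => 0
  | u :: us => if u.1 == e then pvRunLenAux e us + 1 else 0

-- run_length(ts): the loop compares ts[i][0] with ts[0][0]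
def pvRunLen : List (Int × String × Int) → Nat
  | [] => 0
  | t :: ts => pvRunLenAux t.1 (t :: ts)

-- 'seen' loop: first-occurrence dedup of the run's attribute ids
def pvSeen (run : List (Int × String × Int)) : List Int :=
  run.foldl (fun s t => if t.2.2 ∈ s then s else s ++ [t.2.2]) []

-- aggregate(run, k): all values of attribute k in the run, joined or the last one
-- (vals[-1]: the key k always occurs in the run where B calls this, so getLast? is some; "" is unreachable)
def pvAgg (c : Bool) (run : List (Int × String × Int)) (k : Int) : String :=
  let vals := (run.filter (fun t => t.2.2 == k)).map (·.2.1)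
  if c then PySem.Str.join ". " vals else (vals.getLast?).getD ""

-- the while loop over 'rest' with the three accumulators (run[0][0] = head since run_length ≥ 1)
def pvLoopB (c : Bool) (acc : List Int × List (List Int) × List (List String))
    (rest : List (Int × String × Int)) : List Int × List (List Int) × List (List String) :=
  match rest with
  | [] => acc
  | t :: ts =>
    let n := pvRunLen (t :: ts)
    let run := (t :: ts).take n
    let top := (pvSeen run).take 3
    pvLoopB c (acc.1 ++ [t.1], acc.2.1 ++ [top], acc.2.2 ++ [top.map (pvAgg c run)])
      ((t :: ts).drop n)
termination_by rest.length
decreasing_by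
  simp only [List.length_drop, List.length_cons, pvRunLen, pvRunLenAux, BEq.rfl, if_pos]
  omega

def transform_triple2seq_alt (att_triples : List (Int × String × Int)) (language : String) (concate_values : Bool) : List Int × List (List Int) × List (List String) :=
  pvLoopB concate_values ([], [], []) att_triples

-- ===== PRECONDITION & SPEC =====
def Spec_transform_triple2seq (att_triples : List (Int × String × Int)) (language : String) (concate_values : Bool) (out : List Int × List (List Int) × List (List String)) : Prop := out = transform_triple2seq_alt att_triples language concate_values
instance (att_triples : List (Int × String × Int)) (language : String) (concate_values : Bool) (out : List Int × List (List Int) × List (List String)) : Decidable (Spec_transform_triple2seq att_triples language concate_values out) := by unfold Spec_transform_triple2seq; infer_instance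

-- ===== CLAIM (what is proved, stated in full; the proofs are below) =====
def Claim_equal_transform_triple2seq : Prop := ∀ (att_triples : List (Int × String × Int)) (language : String) (concate_values : Bool), Dom_transform_triple2seq att_triples language concate_values → Spec_transform_triple2seq att_triples language concate_values (transform_triple2seq att_triples language concate_values)

-- ===== LEMMAS AND PROOFS =====

-- proof-side: A's dict update as one function
def pvUpd (c : Bool) (d : PySem.Dict Int String) (t : Int × String × Int) : PySem.Dict Int String :=
  if c && d.contains t.2.2 then d.modify t.2.2 "" (fun s => s ++ ". " ++ t.2.1)
  else d.insert t.2.2 t.2.1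

theorem stepA_update_eq (c : Bool) (d : PySem.Dict Int String) (t : Int × String × Int) :
    (if c = false then d.insert t.2.2 t.2.1
     else if d.contains t.2.2 = true then d.modify t.2.2 "" (fun s => s ++ ". " ++ t.2.1)
     else d.insert t.2.2 t.2.1) = pvUpd c d t := by
  unfold pvUpd
  cases c <;> cases h : d.contains t.2.2 <;> simp_all

theorem upd_empty (c : Bool) (t : Int × String × Int) :
    PySem.Dict.empty.insert t.2.2 t.2.1 = pvUpd c PySem.Dict.empty t := by
  simp [pvUpd, PySem.Dict.contains_empty]

-- proof-side: consecutive runs of equal entity ids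
def pvRuns : List (Int × String × Int) → List (Int × List (Int × String × Int))
  | [] => []
  | t :: ts =>
    (t.1, t :: ts.takeWhile (fun u => u.1 == t.1)) :: pvRuns (ts.dropWhile (fun u => u.1 == t.1))
termination_by ts => ts.length
decreasing_by
  simp only [List.length_cons]
  exact Nat.lt_succ_of_le (List.length_dropWhile_le _ _)

theorem pvRuns_cons (t : Int × String × Int) (ts : List (Int × String × Int)) :
    pvRuns (t :: ts) = (t.1, t :: ts.takeWhile (fun u => u.1 == t.1)) :: pvRuns (ts.dropWhile (fun u => u.1 == t.1)) := by
  rw [pvRuns]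

-- proof-side recursion describing A's first loop from a frozen prefix and a current (entity, dict)
def pvG (c : Bool) : List (Int × String × Int) → Int → PySem.Dict Int String → List Int × List (PySem.Dict Int String)
  | [], e, d => ([e], [d])
  | t :: ts, e, d =>
    if t.1 = e then pvG c ts e (pvUpd c d t)
    else
      let p := pvG c ts t.1 (pvUpd c PySem.Dict.empty t)
      (e :: p.1, d :: p.2)

theorem foldA_frozen (c : Bool) (ts : List (Int × String × Int)) :
    ∀ (es : List Int) (ds : List (PySem.Dict Int String)) (e : Int) (d : PySem.Dict Int String),
    ts.foldl (pvStepA c) (es ++ [e], ds ++ [d]) = (es ++ (pvG c ts e d).1, ds ++ (pvG c ts e d).2) := by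
  induction ts with
  | nil => intro es ds e d; simp [pvG]
  | cons t ts ih =>
    intro es ds e d
    have hstep : pvStepA c (es ++ [e], ds ++ [d]) t =
        if t.1 = e then (es ++ [e], ds ++ [pvUpd c d t])
        else ((es ++ [e]) ++ [t.1], (ds ++ [d]) ++ [pvUpd c PySem.Dict.empty t]) := by
      unfold pvStepA
      by_cases ht : t.1 = e
      · simp [ht, stepA_update_eq]
      · simp [ht, List.getLast?_append, ← upd_empty,
          List.dropLast_append_of_ne_nil]
    by_cases ht : t.1 = e
    · simp only [List.foldl_cons, hstep, if_pos ht, pvG, ih]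
    · simp only [List.foldl_cons, hstep, if_neg ht, pvG]
      rw [ih (es ++ [e]) (ds ++ [d]) t.1 (pvUpd c PySem.Dict.empty t)]
      simp [List.append_assoc]

theorem pvG_runs (c : Bool) (ts : List (Int × String × Int)) :
    ∀ (e : Int) (d : PySem.Dict Int String),
    pvG c ts e d =
      (e :: (pvRuns (ts.dropWhile (fun u => u.1 == e))).map (·.1),
       (ts.takeWhile (fun u => u.1 == e)).foldl (pvUpd c) d ::
         (pvRuns (ts.dropWhile (fun u => u.1 == e))).map (fun r => r.2.foldl (pvUpd c) PySem.Dict.empty)) := by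
  induction ts with
  | nil => intro e d; simp [pvG, pvRuns]
  | cons t ts ih =>
    intro e d
    by_cases ht : t.1 = e
    · have hbe : (t.1 == e) = true := by simp [ht]
      simp only [pvG, if_pos ht, ih, List.takeWhile_cons, List.dropWhile_cons, hbe,
        if_pos, List.foldl_cons]
    · have hbe : (t.1 == e) = false := by simp [ht]
      simp only [pvG, if_neg ht, ih t.1 (pvUpd c PySem.Dict.empty t),
        List.takeWhile_cons, List.dropWhile_cons, hbe, Bool.false_eq_true, if_false,
        pvRuns_cons, List.map_cons, List.foldl_nil, List.foldl_cons]

-- A's second loop appends elementwise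
theorem foldA2_spec (ds : List (PySem.Dict Int String)) :
    ∀ (b : List (List Int)) (v : List (List String)),
    ds.foldl (fun (acc : List (List Int) × List (List String)) d =>
        (acc.1 ++ [(pvPassA d).1], acc.2 ++ [(pvPassA d).2])) (b, v) =
      (b ++ ds.map (fun d => (pvPassA d).1), v ++ ds.map (fun d => (pvPassA d).2)) := by
  induction ds with
  | nil => intro b v; simp
  | cons d ds ih => intro b v; simp [ih]

-- ---- B-side structure ----

theorem runLenAux_eq (e : Int) (us : List (Int × String × Int)) :
    pvRunLenAux e us = (us.takeWhile (fun u => u.1 == e)).length := by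
  induction us with
  | nil => rfl
  | cons u us ih =>
    by_cases h : (u.1 == e) = true
    · simp [pvRunLenAux, h, ih]
    · simp [pvRunLenAux, h]

theorem take_takeWhile {α : Type} (p : α → Bool) (us : List α) :
    us.take ((us.takeWhile p).length) = us.takeWhile p := by
  induction us with
  | nil => rfl
  | cons u us ih =>
    by_cases h : p u = true
    · simp [h, ih]
    · simp [h]

theorem drop_takeWhile {α : Type} (p : α → Bool) (us : List α) :
    us.drop ((us.takeWhile p).length) = us.dropWhile p := by
  induction us with
  | nil => rfl
  | cons u us ih =>
    by_cases h : p u = true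
    · simp [h, ih]
    · simp [h]

theorem runLen_cons (t : Int × String × Int) (ts : List (Int × String × Int)) :
    pvRunLen (t :: ts) = (ts.takeWhile (fun u => u.1 == t.1)).length + 1 := by
  simp [pvRunLen, pvRunLenAux, runLenAux_eq]

theorem take_runLen (t : Int × String × Int) (ts : List (Int × String × Int)) :
    (t :: ts).take (pvRunLen (t :: ts)) = t :: ts.takeWhile (fun u => u.1 == t.1) := by
  rw [runLen_cons]
  simp [take_takeWhile]

theorem drop_runLen (t : Int × String × Int) (ts : List (Int × String × Int)) :
    (t :: ts).drop (pvRunLen (t :: ts)) = ts.dropWhile (fun u => u.1 == t.1) := by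
  rw [runLen_cons]
  simp [drop_takeWhile]

theorem loopB_spec (c : Bool) (ts : List (Int × String × Int)) :
    ∀ (a : List Int) (b : List (List Int)) (v : List (List String)),
    pvLoopB c (a, b, v) ts =
      (a ++ (pvRuns ts).map (·.1),
       b ++ (pvRuns ts).map (fun r => (pvSeen r.2).take 3),
       v ++ (pvRuns ts).map (fun r => ((pvSeen r.2).take 3).map (pvAgg c r.2))) := by
  induction ts using pvRuns.induct with
  | case1 => intro a b v; simp [pvLoopB, pvRuns]
  | case2 t ts ih =>
    intro a b v
    rw [pvLoopB, take_runLen, drop_runLen, ih, pvRuns_cons]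
    simp

-- ---- per-run: the dict A builds vs B's dedup + aggregation ----

theorem upd_keys (c : Bool) (d : PySem.Dict Int String) (t : Int × String × Int) :
    (pvUpd c d t).keys = PySem.Set.add d.keys t.2.2 := by
  unfold pvUpd
  rw [PySem.Set.add_eq_ite]
  by_cases h : d.contains t.2.2 = true
  · have hm : t.2.2 ∈ d.keys := (PySem.Dict.contains_iff_mem_keys d t.2.2).mp h
    cases c
    · simp [h, hm, PySem.Dict.keys_insert_of_contains _ _ h]
    · simp [h, hm, PySem.Dict.keys_modify, PySem.Dict.keys_insert_of_contains _ _ h]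
  · have hm : t.2.2 ∉ d.keys := fun hm => h ((PySem.Dict.contains_iff_mem_keys d t.2.2).mpr hm)
    have h' : d.contains t.2.2 = false := by simpa using h
    simp [h', hm, PySem.Dict.keys_insert_of_not_contains _ _ h']

theorem fold_upd_keys (c : Bool) (run : List (Int × String × Int)) :
    ∀ d : PySem.Dict Int String,
    (run.foldl (pvUpd c) d).keys = PySem.Set.update d.keys (run.map (·.2.2)) := by
  induction run with
  | nil => intro d; simp [PySem.Set.update_nil]
  | cons t run ih =>
    intro d
    rw [List.foldl_cons, ih, List.map_cons, PySem.Set.update_cons, upd_keys]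

theorem fold_upd_keys_empty (c : Bool) (run : List (Int × String × Int)) :
    (run.foldl (pvUpd c) PySem.Dict.empty).keys = PySem.Set.ofList (run.map (·.2.2)) := by
  rw [fold_upd_keys]
  simp [PySem.Dict.keys_empty, PySem.Set.update_nil_left]

theorem seen_eq_ofList (run : List (Int × String × Int)) :
    pvSeen run = PySem.Set.ofList (run.map (·.2.2)) := by
  have hfun : (fun (s : List Int) (t : Int × String × Int) => if t.2.2 ∈ s then s else s ++ [t.2.2])
      = fun s t => PySem.Set.add s t.2.2 := by
    funext s t; rw [PySem.Set.add_eq_ite]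
  unfold pvSeen
  rw [hfun, ← PySem.Set.update_map_eq_foldl_add, PySem.Set.update_nil_left]

-- '. '.join over one more piece
theorem chars_join_append (sep : List Char) :
    ∀ (ps : List (List Char)) (q p : List Char),
    PySem.Chars.join sep ((q :: ps) ++ [p]) = PySem.Chars.join sep (q :: ps) ++ sep ++ p := by
  intro ps
  induction ps with
  | nil => intro q p; simp [PySem.Chars.join_cons_cons, PySem.Chars.join_singleton]
  | cons r ps ih =>
    intro q p
    simp only [List.cons_append, PySem.Chars.join_cons_cons]
    rw [← List.cons_append, ih]
    simp [List.append_assoc]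

theorem str_join_append (vs : List String) (v : String) (h : vs ≠ []) :
    PySem.Str.join ". " (vs ++ [v]) = PySem.Str.join ". " vs ++ ". " ++ v := by
  cases vs with
  | nil => exact absurd rfl h
  | cons q vs =>
    simp only [PySem.Str.join, List.map_append, List.map_cons, List.map_nil]
    rw [chars_join_append, String.ofList_append, String.ofList_append]
    simp

theorem str_join_singleton (v : String) : PySem.Str.join ". " [v] = v := by
  simp [PySem.Str.join, PySem.Chars.join_singleton]

-- values of attribute k in run, in order
def pvVals (run : List (Int × String × Int)) (k : Int) : List String :=
  (run.filter (fun t => t.2.2 == k)).map (·.2.1)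

theorem vals_append (run : List (Int × String × Int)) (t : Int × String × Int) (k : Int) :
    pvVals (run ++ [t]) k = pvVals run k ++ if t.2.2 == k then [t.2.1] else [] := by
  unfold pvVals
  by_cases h : (t.2.2 == k) = true <;> simp [List.filter_append, h]

theorem vals_ne_nil_of_mem (run : List (Int × String × Int)) (k : Int)
    (h : k ∈ run.map (·.2.2)) : pvVals run k ≠ [] := by
  intro hnil
  rcases List.mem_map.mp h with ⟨t, ht, hk⟩
  have hmem : t.2.1 ∈ pvVals run k :=
    List.mem_map.mpr ⟨t, List.mem_filter.mpr ⟨ht, by simp [hk]⟩, rfl⟩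
  rw [hnil] at hmem
  exact absurd hmem (List.not_mem_nil)

theorem vals_nil_of_not_mem (run : List (Int × String × Int)) (k : Int)
    (h : k ∉ run.map (·.2.2)) : pvVals run k = [] := by
  unfold pvVals
  rw [List.filter_eq_nil_iff.mpr]
  · rfl
  · intro t ht hk
    exact h (List.mem_map.mpr ⟨t, ht, by simpa using hk⟩)

theorem fold_upd_getD_false (run : List (Int × String × Int)) (k : Int) :
    (run.foldl (pvUpd false) PySem.Dict.empty).getD k "" = ((pvVals run k).getLast?).getD "" := by
  induction run using List.reverseRecOn with
  | nil => simp [pvVals, PySem.Dict.getD_empty]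
  | append_singleton run t ih =>
    rw [List.foldl_append, List.foldl_cons, List.foldl_nil]
    have hupd : pvUpd false (run.foldl (pvUpd false) PySem.Dict.empty) t =
        (run.foldl (pvUpd false) PySem.Dict.empty).insert t.2.2 t.2.1 := by
      simp [pvUpd]
    rw [hupd, PySem.Dict.getD_insert, vals_append]
    by_cases h : k = t.2.2
    · simp [h]
    · have h' : (t.2.2 == k) = false := by simp [Ne.symm h]
      simp [h, h', ih]

theorem fold_upd_getD_true (run : List (Int × String × Int)) (k : Int) :
    (run.foldl (pvUpd true) PySem.Dict.empty).getD k "" =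
      if k ∈ run.map (·.2.2) then PySem.Str.join ". " (pvVals run k) else "" := by
  induction run using List.reverseRecOn with
  | nil => simp [PySem.Dict.getD_empty]
  | append_singleton run t ih =>
    rw [List.foldl_append, List.foldl_cons, List.foldl_nil]
    have hcont : (run.foldl (pvUpd true) PySem.Dict.empty).contains t.2.2
        = decide (t.2.2 ∈ run.map (·.2.2)) := by
      rw [PySem.Dict.contains_eq_decide_mem_keys, fold_upd_keys_empty]
      simp [PySem.Set.mem_ofList]
    by_cases hm : t.2.2 ∈ run.map (·.2.2)
    · have hupd : pvUpd true (run.foldl (pvUpd true) PySem.Dict.empty) t =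
          (run.foldl (pvUpd true) PySem.Dict.empty).modify t.2.2 "" (fun s => s ++ ". " ++ t.2.1) := by
        simp [pvUpd, hcont, hm]
      rw [hupd, PySem.Dict.getD_modify, vals_append]
      by_cases h : k = t.2.2
      · have ih' : (run.foldl (pvUpd true) PySem.Dict.empty).getD t.2.2 ""
            = PySem.Str.join ". " (pvVals run t.2.2) := by
          rw [h] at ih; simpa [hm] using ih
        have hjoin := str_join_append (pvVals run t.2.2) t.2.1 (vals_ne_nil_of_mem run t.2.2 hm)
        simp [h, hm, hjoin, ih', List.map_append, List.mem_append]
      · have h' : (t.2.2 == k) = false := by simp [Ne.symm h]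
        have hcond : (k ∈ List.map (fun x => x.2.2) (run ++ [t])) ↔ (k ∈ List.map (fun x => x.2.2) run) := by
          simp [h]
        simp [h, h', ih]
        exact (if_congr hcond rfl rfl).symm
    · have hupd : pvUpd true (run.foldl (pvUpd true) PySem.Dict.empty) t =
          (run.foldl (pvUpd true) PySem.Dict.empty).insert t.2.2 t.2.1 := by
        simp [pvUpd, hcont, hm]
      rw [hupd, PySem.Dict.getD_insert, vals_append]
      by_cases h : k = t.2.2
      · rw [h, vals_nil_of_not_mem run t.2.2 hm]
        simp [str_join_singleton, List.map_append, List.mem_append]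
      · have h' : (t.2.2 == k) = false := by simp [Ne.symm h]
        have hcond : (k ∈ List.map (fun x => x.2.2) (run ++ [t])) ↔ (k ∈ List.map (fun x => x.2.2) run) := by
          simp [h]
        simp [h, h', ih]
        exact (if_congr hcond rfl rfl).symm

theorem fold_upd_getD_agg (c : Bool) (run : List (Int × String × Int)) (k : Int)
    (hm : k ∈ run.map (·.2.2)) :
    (run.foldl (pvUpd c) PySem.Dict.empty).getD k "" = pvAgg c run k := by
  cases c
  · rw [fold_upd_getD_false]; simp [pvAgg, pvVals]
  · rw [fold_upd_getD_true]; simp [pvAgg, pvVals, hm]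

-- per-run: A's top-3 keys/values from the dict = B's dedup + aggregation
theorem passA_run (c : Bool) (run : List (Int × String × Int)) :
    pvPassA (run.foldl (pvUpd c) PySem.Dict.empty) =
      ((pvSeen run).take 3, ((pvSeen run).take 3).map (pvAgg c run)) := by
  have hkeys : (run.foldl (pvUpd c) PySem.Dict.empty).keys = pvSeen run := by
    rw [fold_upd_keys_empty, seen_eq_ofList]
  have hnd : (run.foldl (pvUpd c) PySem.Dict.empty).keys.Nodup := by
    rw [hkeys, seen_eq_ofList]; exact PySem.Set.nodup_ofList _
  have hitems := PySem.Dict.items_eq_map_keys (run.foldl (pvUpd c) PySem.Dict.empty) hnd ""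
  unfold pvPassA
  rw [hitems, hkeys]
  simp only [Prod.mk.injEq]
  constructor
  · simp [List.map_map, Function.comp_def]
  · rw [List.map_map, ← List.map_take]
    apply List.map_congr_left
    intro k hk
    simp only [Function.comp_apply]
    have hk' : k ∈ pvSeen run := List.mem_of_mem_take hk
    have hm : k ∈ run.map (·.2.2) := by
      rw [seen_eq_ofList] at hk'
      exact (PySem.Set.mem_ofList _ _).mp hk'
    exact fold_upd_getD_agg c run k hm

-- ===== VERDICT (by name: the statement is the Claim_ definition above) =====
theorem transform_triple2seq_spec : Claim_equal_transform_triple2seq := by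
  intro ts lang c _
  unfold Spec_transform_triple2seq transform_triple2seq transform_triple2seq_alt
  cases ts with
  | nil => simp [pvLoopB]
  | cons t ts =>
    have hfirst : pvStepA c ([], []) t = ([t.1], [pvUpd c PySem.Dict.empty t]) := by
      unfold pvStepA
      simp [← upd_empty]
    have hfold : (t :: ts).foldl (pvStepA c) ([], []) =
        ((pvG c ts t.1 (pvUpd c PySem.Dict.empty t)).1,
          (pvG c ts t.1 (pvUpd c PySem.Dict.empty t)).2) := by
      have := foldA_frozen c ts [] [] t.1 (pvUpd c PySem.Dict.empty t)
      simpa [hfirst] using this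
    rw [hfold, pvG_runs, loopB_spec, pvRuns_cons]
    simp only [foldA2_spec]
    have hp := passA_run c (t :: ts.takeWhile (fun u => u.1 == t.1))
    rw [List.foldl_cons] at hp
    simp [hp]
    constructor <;> (intro a b _hb; simp [passA_run c b, List.map_take])
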